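-- pv_equiv track=rewrite | github.com/ctmcdo/code_jam_attempts | 2021/qualification/moons_and_umbrellas/moons_and_umbrellas.py | cost
-- ===== SOURCE A (Python) =====
-- def cost(S, X, Y):
--     c = 0
--     for i in range(1, len(S)):
--         s1 = S[i - 1]
--         s2 = S[i]
--         pair = s1 + s2
--
--         if pair == "CJ":
--             c += X
--         elif pair == "JC":
--             c += Y
--     return c
-- ===== SOURCE B (Python) =====
-- def cost(S, X, Y):
--     return S.count("CJ") * X + S.count("JC") * Y
-- ===== Notes on version B (the rewrite author's own statement) =====
-- stated objective: idiomatic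
-- what changed: Replaces the explicit index loop over adjacent character pairs with a closed-form expression built from two str.count substring scans ('CJ' and 'JC' cannot self-overlap, so counts match the pairwise detection).
import Mathlib
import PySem

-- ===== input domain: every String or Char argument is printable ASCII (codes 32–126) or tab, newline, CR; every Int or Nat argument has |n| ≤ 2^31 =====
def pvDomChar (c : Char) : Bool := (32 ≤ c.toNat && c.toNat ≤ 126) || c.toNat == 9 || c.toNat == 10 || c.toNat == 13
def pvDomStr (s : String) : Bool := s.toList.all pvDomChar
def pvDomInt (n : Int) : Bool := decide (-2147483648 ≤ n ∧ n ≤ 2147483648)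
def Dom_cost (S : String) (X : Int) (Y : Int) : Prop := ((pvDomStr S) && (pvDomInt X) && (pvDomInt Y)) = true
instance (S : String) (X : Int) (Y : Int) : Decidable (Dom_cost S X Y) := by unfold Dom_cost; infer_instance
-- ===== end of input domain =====

-- B replaces A's explicit index loop over adjacent pairs with a closed form
-- built from two substring counts (idiomatic; same return value, proved below).

-- ===== PORT A =====
-- literal port of A's index loop: for i in range(1, len(S)): pair = S[i-1] + S[i]; …
def cost (S : String) (X : Int) (Y : Int) : Int :=
  (PySem.List.pyRange 1 (PySem.Str.len S)).foldl
    (fun c i =>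
      match PySem.Str.pyGet? S (i - 1), PySem.Str.pyGet? S i with
      | some s1, some s2 =>
          let pair := String.ofList [s1, s2]
          if pair = "CJ" then c + X
          else if pair = "JC" then c + Y
          else c
      | _, _ => c)   -- unreachable: i and i-1 are in range for i in range(1, len(S))
    0

-- ===== PORT B =====
-- literal port of B: S.count("CJ") * X + S.count("JC") * Y
def cost_alt (S : String) (X : Int) (Y : Int) : Int :=
  (PySem.Str.count S "CJ" : Int) * X + (PySem.Str.count S "JC" : Int) * Y

-- ===== PRECONDITION & SPEC =====
def Spec_cost (S : String) (X : Int) (Y : Int) (out : Int) : Prop := out = cost_alt S X Y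
instance (S : String) (X : Int) (Y : Int) (out : Int) : Decidable (Spec_cost S X Y out) := by unfold Spec_cost; infer_instance

-- ===== CLAIM (what is proved, stated in full; the proofs are below) =====
def Claim_equal_cost : Prop := ∀ (S : String) (X : Int) (Y : Int), Dom_cost S X Y → Spec_cost S X Y (cost S X Y)

-- ===== LEMMAS AND PROOFS =====

-- the list of adjacent pairs of l
def pvPairs : List Char → List (Char × Char)
  | a :: b :: t => (a, b) :: pvPairs (b :: t)
  | _ => []

theorem pvPairs_count_of_ne {a b : Char} (x : Char) (t : List Char) :
    (pvPairs (x :: t)).count (a, b) =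
      (if x = a ∧ t.head? = some b then 1 else 0) + (pvPairs t).count (a, b) := by
  cases t with
  | nil => simp [pvPairs]
  | cons y t' =>
    simp only [pvPairs, List.count_cons, List.head?_cons]
    split_ifs with h1 h2 h2 <;> simp_all <;> omega

-- A's per-step body, on a pair of characters
def pvStep (X Y : Int) (c : Int) (p : Char × Char) : Int :=
  if String.ofList [p.1, p.2] = "CJ" then c + X
  else if String.ofList [p.1, p.2] = "JC" then c + Y
  else c

theorem pvOfList_pair_eq (s1 s2 a b : Char) :
    (String.ofList [s1, s2] = String.ofList [a, b]) ↔ (s1 = a ∧ s2 = b) := by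
  constructor
  · intro h
    have := congrArg String.toList h
    simpa using this
  · rintro ⟨rfl, rfl⟩; rfl

-- folding A's body over pvPairs computes #CJ * X + #JC * Y
theorem pvFold_pairs (X Y : Int) (P : List (Char × Char)) (c : Int) :
    P.foldl (pvStep X Y) c =
      c + (P.count ('C', 'J') : Int) * X + (P.count ('J', 'C') : Int) * Y := by
  induction P generalizing c with
  | nil => simp
  | cons p t ih =>
    obtain ⟨s1, s2⟩ := p
    simp only [List.foldl_cons, List.count_cons, ih, pvStep]
    have hCJ : (String.ofList [s1, s2] = "CJ") ↔ (s1 = 'C' ∧ s2 = 'J') := by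
      have : ("CJ" : String) = String.ofList ['C', 'J'] := rfl
      rw [this, pvOfList_pair_eq]
    have hJC : (String.ofList [s1, s2] = "JC") ↔ (s1 = 'J' ∧ s2 = 'C') := by
      have : ("JC" : String) = String.ofList ['J', 'C'] := rfl
      rw [this, pvOfList_pair_eq]
    split_ifs with h1 h2 <;>
      simp_all [Prod.ext_iff] <;> ring

-- the index fold of A equals the fold over the pair list
theorem pvIdxFold (X Y : Int) (l : List Char) (c : Int) :
    (List.range (l.length - 1)).foldl
        (fun c k =>
          match l[k]?, l[k + 1]? with
          | some s1, some s2 => pvStep X Y c (s1, s2)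
          | _, _ => c) c
      = (pvPairs l).foldl (pvStep X Y) c := by
  induction l generalizing c with
  | nil => simp [pvPairs]
  | cons a t ih =>
    cases t with
    | nil => simp [pvPairs]
    | cons b t' =>
      have hlen : (a :: b :: t').length - 1 = t'.length + 1 := by simp
      rw [hlen, List.range_succ_eq_map]
      simp only [List.foldl_cons, List.foldl_map]
      have hstep :
          (fun (c : Int) (k : ℕ) =>
              match (a :: b :: t')[k + 1]?, (a :: b :: t')[k + 1 + 1]? with
              | some s1, some s2 => pvStep X Y c (s1, s2)
              | _, _ => c)
            = (fun (c : Int) (k : ℕ) =>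
              match (b :: t')[k]?, (b :: t')[k + 1]? with
              | some s1, some s2 => pvStep X Y c (s1, s2)
              | _, _ => c) := by
        funext c k
        simp
      have h0 : (a :: b :: t')[0]? = some a := rfl
      have h1 : (a :: b :: t')[1]? = some b := rfl
      simp only [h0, h1, hstep]
      have := ih (c := pvStep X Y c (a, b))
      simpa using this

-- Python's non-overlapping substring count for a 2-char pattern with distinct
-- characters equals the count of the pattern among adjacent pairs
theorem pvCountGo {a b : Char} (hab : a ≠ b) :
    ∀ (fuel : ℕ) (s : List Char) (acc : ℕ), s.length ≤ fuel →
      PySem.Chars.count.go [a, b] fuel s acc = acc + (pvPairs s).count (a, b) := by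
  intro fuel
  induction fuel with
  | zero =>
    intro s acc h
    have : s = [] := by cases s <;> simp_all
    subst this
    simp [PySem.Chars.count.go, pvPairs]
  | succ f ih =>
    intro s acc h
    cases s with
    | nil => simp [PySem.Chars.count.go, pvPairs]
    | cons x t =>
      rw [PySem.Chars.count.go.eq_def]
      simp only []
      by_cases hp : [a, b].isPrefixOf (x :: t) = true
      · rw [if_pos hp]
        -- prefix means x = a and t = b :: rest
        rcases t with _ | ⟨y, rest⟩
        · simp [List.isPrefixOf] at hp
        · simp only [List.isPrefixOf, Bool.and_true,
            Bool.and_eq_true, beq_iff_eq] at hp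
          obtain ⟨hx, hy⟩ := hp
          subst hx; subst hy
          have hlen : rest.length ≤ f := by simp at h; omega
          rw [show List.drop ([a,b].length) (a :: b :: rest) = rest by simp]
          rw [ih rest (acc + 1) hlen]
          have hcount : (pvPairs (a :: b :: rest)).count (a, b)
              = 1 + (pvPairs rest).count (a, b) := by
            have h2 := pvPairs_count_of_ne (a := a) (b := b) b rest
            have hhead : ¬ (b = a ∧ rest.head? = some b) := by
              intro ⟨hba, _⟩; exact hab hba.symm
            simp only [pvPairs, List.count_cons]
            rw [h2, if_neg hhead]
            simp
            omega
          omega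
      · rw [if_neg hp]
        have hlen : t.length ≤ f := by simp at h; omega
        rw [ih t acc hlen]
        have hhead : ¬ (x = a ∧ t.head? = some b) := by
          rintro ⟨rfl, hh⟩
          rcases t with _ | ⟨y, rest⟩
          · simp at hh
          · simp at hh
            subst hh
            simp [List.isPrefixOf] at hp
        rw [pvPairs_count_of_ne x t, if_neg hhead]
        omega

theorem pvCount_pairs {a b : Char} (hab : a ≠ b) (l : List Char) :
    PySem.Chars.count l [a, b] = (pvPairs l).count (a, b) := by
  rw [PySem.Chars.count]
  simpa using pvCountGo hab l.length l 0 le_rfl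

-- ===== VERDICT (by name: the statement is the Claim_ definition above) =====
theorem cost_spec : Claim_equal_cost := by
  intro S X Y _
  unfold Spec_cost cost cost_alt
  set l := S.toList with hl
  have hlen : PySem.Str.len S = (l.length : Int) := by
    simp [PySem.Str.len_eq, hl]
  rw [hlen]
  rw [PySem.List.pyRange_of_pos 1 (l.length : Int) (by norm_num)]
  have hm : (if (1 : Int) < (l.length : Int)
      then (((l.length : Int) - 1 + 1 - 1) / 1).toNat else 0) = l.length - 1 := by
    split_ifs with h
    · omega
    · omega
  rw [hm, List.foldl_map]
  have hbody : (fun (c : Int) (k : ℕ) =>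
      match PySem.Str.pyGet? S (1 + 1 * (k : Int) - 1), PySem.Str.pyGet? S (1 + 1 * (k : Int)) with
      | some s1, some s2 =>
          let pair := String.ofList [s1, s2]
          if pair = "CJ" then c + X else if pair = "JC" then c + Y else c
      | _, _ => c)
      = (fun (c : Int) (k : ℕ) =>
      match l[k]?, l[k + 1]? with
      | some s1, some s2 => pvStep X Y c (s1, s2)
      | _, _ => c) := by
    funext c k
    have e1 : (1 + 1 * (k : Int) - 1) = ((k : ℕ) : Int) := by ring
    have e2 : (1 + 1 * (k : Int)) = ((k + 1 : ℕ) : Int) := by push_cast; ring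
    rw [e1, e2, PySem.Str.pyGet?_natCast, PySem.Str.pyGet?_natCast, ← hl]
    rfl
  rw [hbody, pvIdxFold, pvFold_pairs]
  have hCJ : PySem.Str.count S "CJ" = (pvPairs l).count ('C', 'J') := by
    have : PySem.Str.count S "CJ" = PySem.Chars.count l ['C', 'J'] := by
      simp [PySem.Str.count, hl]
    rw [this, pvCount_pairs (by decide)]
  have hJC : PySem.Str.count S "JC" = (pvPairs l).count ('J', 'C') := by
    have : PySem.Str.count S "JC" = PySem.Chars.count l ['J', 'C'] := by
      simp [PySem.Str.count, hl]
    rw [this, pvCount_pairs (by decide)]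
  rw [hCJ, hJC]
  ring
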